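-- pv_equiv track=rewrite | github.com/KotagiriKrishna/webscrap | scraper.py | clean_and_sort_education
-- ===== SOURCE A (Python) =====
-- def clean_and_sort_education(education):
--     l =[]
--     if education and education not in [ [""], "0" , 0, None]:
--         for i in education:
--             if (i[0]) =="P":
--                 return i
--
--         for i in education:
--             if (i[0]) =="M":
--                 return i
--
--         for i in education:
--             if (i[0]) =="P":
--                 return i
-- ===== SOURCE B (Python) =====
-- def clean_and_sort_education(education):
--     if education and education not in [[""], "0", 0, None]:
--         fallback = None
--         for i in education:
--             if i[0] == "P":
--                 return i
--             if i[0] == "M" and fallback is None: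
--                 fallback = i
--         return fallback
-- ===== Notes on version B (the rewrite author's own statement) =====
-- stated objective: simpler
-- what changed: replaces A's three sequential scans (first-P, first-M, dead first-P) with one pass that returns the first P immediately and keeps the first M as a fallback
import Mathlib
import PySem

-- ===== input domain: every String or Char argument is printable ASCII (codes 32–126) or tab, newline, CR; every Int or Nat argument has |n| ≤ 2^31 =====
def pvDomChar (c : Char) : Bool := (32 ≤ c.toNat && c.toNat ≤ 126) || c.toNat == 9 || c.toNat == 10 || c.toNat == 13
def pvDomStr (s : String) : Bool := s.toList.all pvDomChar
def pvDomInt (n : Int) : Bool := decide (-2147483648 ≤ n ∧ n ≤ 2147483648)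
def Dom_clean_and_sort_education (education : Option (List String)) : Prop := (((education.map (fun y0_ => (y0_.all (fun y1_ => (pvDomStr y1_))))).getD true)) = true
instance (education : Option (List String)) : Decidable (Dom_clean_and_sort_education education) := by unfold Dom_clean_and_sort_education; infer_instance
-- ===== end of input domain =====

-- B is a single pass (return the first 'P'-entry immediately, keep the first 'M'-entry as a
-- fallback) instead of A's three sequential scans; simpler, not claimed faster.

-- ===== PORT A =====
-- A's 'for i in education: if i[0] == c: return i' loop; i[0] raising IndexError on an
-- empty string is modelled by pyGet? = none (such inputs are excluded by Pre_).
def pvScanFor (c : Char) : List String → Option String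
  | [] => none
  | i :: rest =>
    match PySem.Str.pyGet? i 0 with
    | none => none            -- IndexError in Python; outside Pre_
    | some ch => if ch = c then some i else pvScanFor c rest

def clean_and_sort_education (education : Option (List String)) : Option String :=
  match education with
  | none => none              -- 'education' falsy
  | some l =>
    -- 'if education and education not in [[""], "0", 0, None]' : for a list argument this
    -- is exactly 'nonempty and ≠ [""]'
    if l = [] ∨ l = [""] then none
    else
      match pvScanFor 'P' l with
      | some i => some i
      | none =>
        match pvScanFor 'M' l with
        | some i => some i
        | none =>
          match pvScanFor 'P' l with   -- A's third (dead) scan, kept literally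
          | some i => some i
          | none => none

-- ===== PORT B =====
-- B's single loop carrying the fallback; per element 'P' is tested before 'M', as in Source B.
def pvOnePass : List String → Option String → Option String
  | [], fb => fb
  | i :: rest, fb =>
    match PySem.Str.pyGet? i 0 with
    | none => none            -- IndexError in Python; outside Pre_
    | some ch =>
      if ch = 'P' then some i
      else pvOnePass rest (if ch = 'M' ∧ fb = none then some i else fb)

def clean_and_sort_education_alt (education : Option (List String)) : Option String :=
  match education with
  | none => none
  | some l =>
    if l = [] ∨ l = [""] then none
    else pvOnePass l none

-- ===== PRECONDITION & SPEC =====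
-- Pre_ excludes exactly the inputs on which A raises IndexError (and B raises it too): a
-- list containing an empty-string entry not preceded by an entry starting with 'P'.
def Pre_clean_and_sort_education (education : Option (List String)) : Prop :=
  (education.getD []) = [] ∨ (education.getD []) = [""] ∨
    ∀ j < (education.getD []).length, (education.getD []).getD j "" = "" →
      ∃ k < j, PySem.Str.pyGet? ((education.getD []).getD k "") 0 = some 'P'
instance (education : Option (List String)) : Decidable (Pre_clean_and_sort_education education) := by
  unfold Pre_clean_and_sort_education; infer_instance

def pvWitness_clean_and_sort_education : Option (List String) := some ["MSc", "PhD", ""]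

def Spec_clean_and_sort_education (education : Option (List String)) (out : Option String) : Prop := out = clean_and_sort_education_alt education
instance (education : Option (List String)) (out : Option String) : Decidable (Spec_clean_and_sort_education education out) := by unfold Spec_clean_and_sort_education; infer_instance

-- ===== CLAIM (what is proved, stated in full; the proofs are below) =====
def Claim_equal_clean_and_sort_education : Prop := ∀ (education : Option (List String)), Dom_clean_and_sort_education education → Pre_clean_and_sort_education education → Spec_clean_and_sort_education education (clean_and_sort_education education)

-- ===== LEMMAS AND PROOFS =====

-- The "no empty-string entry before the first 'P'-entry" invariant on a bare list.
def pvOK (l : List String) : Prop :=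
  ∀ j < l.length, l.getD j "" = "" →
    ∃ k < j, PySem.Str.pyGet? (l.getD k "") 0 = some 'P'

lemma pvOK_head_ne_empty {i : String} {rest : List String} (h : pvOK (i :: rest)) :
    i ≠ "" := by
  intro hi
  obtain ⟨k, hk, _⟩ := h 0 (by simp) (by simpa using hi)
  omega

lemma pvOK_tail {i : String} {rest : List String} (h : pvOK (i :: rest))
    (hP : PySem.Str.pyGet? i 0 ≠ some 'P') : pvOK rest := by
  intro j hj hje
  obtain ⟨k, hk, hkP⟩ := h (j + 1) (by simpa using Nat.succ_lt_succ hj) (by simpa using hje)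
  match k, hk with
  | 0, _ => exact absurd hkP (by simpa using hP)
  | k + 1, hk => exact ⟨k, by omega, by simpa using hkP⟩

lemma pyGet?_zero_of_ne_empty {i : String} (h : i ≠ "") :
    ∃ c, PySem.List.pyGet? i.toList 0 = some c := by
  cases hc : i.toList with
  | nil => exact absurd (String.toList_eq_nil_iff.mp hc) h
  | cons c cs => exact ⟨c, by simp [PySem.List.pyGet?, PySem.List.pyIdx?]⟩

-- B's loop equals "first P, else fallback, else first M", under the invariant.
lemma pvOnePass_eq (l : List String) (hOK : pvOK l) (fb : Option String) :
    pvOnePass l fb =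
      (match pvScanFor 'P' l with
       | some i => some i
       | none => match fb with
                 | some f => some f
                 | none => pvScanFor 'M' l) := by
  induction l generalizing fb with
  | nil => cases fb <;> simp [pvOnePass, pvScanFor]
  | cons i rest ih =>
    obtain ⟨c, hc⟩ := pyGet?_zero_of_ne_empty (pvOK_head_ne_empty hOK)
    by_cases hP : c = 'P'
    · subst hP; simp [pvOnePass, pvScanFor, hc]
    · have hOK' : pvOK rest := pvOK_tail hOK (by simp [PySem.Str.pyGet?, hc, hP])
      by_cases hM : c = 'M'
      · subst hM
        cases fb with
        | none => simp [pvOnePass, pvScanFor, hc, ih hOK']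
        | some f => simp [pvOnePass, pvScanFor, hc, ih hOK']
      · cases fb <;> simp [pvOnePass, pvScanFor, hc, hP, hM, ih hOK']

-- ===== VERDICT (by name: the statement is the Claim_ definition above) =====
theorem clean_and_sort_education_spec : Claim_equal_clean_and_sort_education := by
  intro education _ hPre
  unfold Spec_clean_and_sort_education clean_and_sort_education clean_and_sort_education_alt
  cases education with
  | none => rfl
  | some l =>
    by_cases hg : l = [] ∨ l = [""]
    · simp [hg]
    · have hOK : pvOK l := by
        unfold Pre_clean_and_sort_education at hPre
        rcases hPre with h | h | h
        · exact absurd (Or.inl h) hg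
        · exact absurd (Or.inr h) hg
        · exact h
      simp only [if_neg hg, pvOnePass_eq l hOK none]
      cases pvScanFor 'P' l <;> cases pvScanFor 'M' l <;> simp
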